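-- pv_equiv track=rewrite | github.com/Kymylyy/pl-monitoring | archive/analyze_register.py | contains_keywords
-- ===== SOURCE A (Python) =====
-- from typing import List, Dict, Optional, Set
--
-- def contains_keywords(text: str, keywords: List[str], case_sensitive: bool = False) -> Set[str]:
--     """
--     Sprawdza czy tekst zawiera którekolwiek ze słów kluczowych
--     Zwraca zbiór dopasowanych słów kluczowych
--     """
--     matched = set()
--
--     if not text:
--         return matched
--
--     if not case_sensitive:
--         text_lower = text.lower()
--         for keyword in keywords:
--             if keyword.lower() in text_lower:
--                 matched.add(keyword)
--     else:
--         for keyword in keywords: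
--             if keyword in text:
--                 matched.add(keyword)
--
--     return matched
-- ===== SOURCE B (Python) =====
-- from typing import List, Set
--
--
-- def contains_keywords(text: str, keywords: List[str], case_sensitive: bool = False) -> Set[str]:
--     if not text:
--         return set()
--     t = text if case_sensitive else text.lower()
--     pats = [k if case_sensitive else k.lower() for k in keywords]
--     grams = {}
--     for p in pats:
--         L = len(p)
--         if L not in grams:
--             grams[L] = {t[i:i + L] for i in range(len(t) + 1 - L)}
--     return {k for k, p in zip(keywords, pats) if p in grams[len(p)]}
-- ===== Notes on version B (the rewrite author's own statement) =====
-- stated objective: faster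
-- what changed: Replaces A's per-keyword substring search ('kw in text') by a hash index: for each distinct normalized keyword length L the set of all length-L substrings of the text is built once, and keywords are matched by set membership; the two case branches collapse into one normalization step.
import Mathlib
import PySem

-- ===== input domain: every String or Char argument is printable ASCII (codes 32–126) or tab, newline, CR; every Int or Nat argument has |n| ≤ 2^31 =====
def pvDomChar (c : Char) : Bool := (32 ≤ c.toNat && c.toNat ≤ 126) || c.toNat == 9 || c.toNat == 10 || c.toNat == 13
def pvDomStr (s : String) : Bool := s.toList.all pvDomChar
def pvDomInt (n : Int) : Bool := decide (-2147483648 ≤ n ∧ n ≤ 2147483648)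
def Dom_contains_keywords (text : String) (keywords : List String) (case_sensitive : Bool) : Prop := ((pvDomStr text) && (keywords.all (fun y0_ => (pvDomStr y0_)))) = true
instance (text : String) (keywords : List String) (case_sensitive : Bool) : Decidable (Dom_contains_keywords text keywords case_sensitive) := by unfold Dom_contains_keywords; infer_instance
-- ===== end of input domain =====

-- B replaces A's per-keyword 'in' search by a hash index: for each distinct (normalized) keyword
-- length L it builds the set of all length-L substrings of the text once, then matches keywords by
-- set membership. Return value only; no argument is mutated.

-- ===== PORT A =====
def contains_keywords (text : String) (keywords : List String) (case_sensitive : Bool) : List String :=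
  let matched : PySem.Set String := PySem.Set.empty
  if text = "" then
    matched
  else if !case_sensitive then
    let text_lower := PySem.Str.lower text
    keywords.foldl (fun m keyword =>
      if PySem.Str.isIn (PySem.Str.lower keyword) text_lower then PySem.Set.add m keyword else m) matched
  else
    keywords.foldl (fun m keyword =>
      if PySem.Str.isIn keyword text then PySem.Set.add m keyword else m) matched

-- ===== PORT B =====
-- {t[i:i+L] for i in range(len(t) + 1 - L)}  (slice t[i:i+L] with 0 ≤ i is (t.drop i).take L,
-- cf. PySem.List.slice_natCast_add; Python's empty range for L > len(t) is the Nat-truncated 0 here)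
def cwGrams (t : List Char) (L : Nat) : PySem.Set (List Char) :=
  PySem.Set.ofList ((List.range (t.length + 1 - L)).map (fun i => (t.drop i).take L))

-- loop body: if L not in grams: grams[L] = {…}
def cwStep (t : List Char) (g : PySem.Dict Nat (PySem.Set (List Char))) (p : List Char) :
    PySem.Dict Nat (PySem.Set (List Char)) :=
  if PySem.Dict.contains g p.length then g else PySem.Dict.insert g p.length (cwGrams t p.length)

def contains_keywords_alt (text : String) (keywords : List String) (case_sensitive : Bool) : List String :=
  if text = "" then
    PySem.Set.empty
  else
    let t := if case_sensitive then text.toList else PySem.Chars.lower text.toList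
    let pats := keywords.map (fun k => if case_sensitive then k.toList else PySem.Chars.lower k.toList)
    let grams := pats.foldl (cwStep t) PySem.Dict.empty
    -- 'p in grams[len(p)]': the key len(p) is always present (proved below), so the total getD is exact
    PySem.Set.ofList (((keywords.zip pats).filter
      (fun kp => PySem.Set.contains (PySem.Dict.getD grams kp.2.length PySem.Set.empty) kp.2)).map Prod.fst)

-- ===== PRECONDITION & SPEC =====
def Spec_contains_keywords (text : String) (keywords : List String) (case_sensitive : Bool) (out : List String) : Prop := out = contains_keywords_alt text keywords case_sensitive
instance (text : String) (keywords : List String) (case_sensitive : Bool) (out : List String) : Decidable (Spec_contains_keywords text keywords case_sensitive out) := by unfold Spec_contains_keywords; infer_instance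

-- ===== CLAIM (what is proved, stated in full; the proofs are below) =====
def Claim_equal_contains_keywords : Prop := ∀ (text : String) (keywords : List String) (case_sensitive : Bool), Dom_contains_keywords text keywords case_sensitive → Spec_contains_keywords text keywords case_sensitive (contains_keywords text keywords case_sensitive)

-- ===== LEMMAS AND PROOFS =====

-- Python's 'sub in s' is list infix.
theorem charsIsIn_iff (sub s : List Char) : PySem.Chars.isIn sub s = true ↔ sub <:+: s := by
  simpa using PySem.Str.isIn_iff_infix (String.ofList sub) (String.ofList s)

-- the substring index decides occurrence
theorem contains_cwGrams (p t : List Char) :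
    PySem.Set.contains (cwGrams t p.length) p = true ↔ p <:+: t := by
  unfold cwGrams
  rw [PySem.Set.contains_iff, PySem.Set.mem_ofList]
  simp only [List.mem_map, List.mem_range]
  constructor
  · rintro ⟨i, _, h⟩
    exact List.IsInfix.trans (h ▸ (List.take_prefix _ _).isInfix) (List.drop_suffix i t).isInfix
  · rintro ⟨s, u, rfl⟩
    refine ⟨s.length, ?_, ?_⟩
    · simp only [List.length_append]; omega
    · rw [List.append_assoc, List.drop_left, List.take_left]

-- every value stored by the grams loop is the substring index of its key
theorem get?_foldl_cwStep (t : List Char) (ps : List (List Char))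
    (g : PySem.Dict Nat (PySem.Set (List Char)))
    (h : ∀ L S, PySem.Dict.get? g L = some S → S = cwGrams t L) :
    ∀ L S, PySem.Dict.get? (ps.foldl (cwStep t) g) L = some S → S = cwGrams t L := by
  induction ps generalizing g with
  | nil => exact h
  | cons p ps ih =>
    intro L S hS
    refine ih (cwStep t g p) ?_ L S hS
    intro L' S' hS'
    unfold cwStep at hS'
    split at hS'
    · exact h L' S' hS'
    · rw [PySem.Dict.get?_insert] at hS'
      split at hS'
      · cases hS'; subst ‹L' = p.length›; rfl
      · exact h L' S' hS'

theorem isSome_foldl_cwStep_mono (t : List Char) (ps : List (List Char))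
    (g : PySem.Dict Nat (PySem.Set (List Char))) (L : Nat)
    (h : (PySem.Dict.get? g L).isSome) :
    (PySem.Dict.get? (ps.foldl (cwStep t) g) L).isSome := by
  induction ps generalizing g with
  | nil => exact h
  | cons p ps ih =>
    refine ih (cwStep t g p) ?_
    unfold cwStep
    split
    · exact h
    · rw [PySem.Dict.get?_insert]
      split
      · rfl
      · exact h

-- the key len(p) is present after the loop for every processed pattern p
theorem isSome_foldl_cwStep (t : List Char) (ps : List (List Char))
    (g : PySem.Dict Nat (PySem.Set (List Char))) (p : List Char) (hp : p ∈ ps) :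
    (PySem.Dict.get? (ps.foldl (cwStep t) g) p.length).isSome := by
  induction ps generalizing g with
  | nil => cases hp
  | cons q ps ih =>
    rcases List.mem_cons.mp hp with rfl | hp'
    · refine isSome_foldl_cwStep_mono t ps (cwStep t g p) p.length ?_
      unfold cwStep
      split
      · rw [← PySem.Dict.contains_eq_isSome_get?]; assumption
      · rw [PySem.Dict.get?_insert_self]; rfl
    · exact ih (cwStep t g q) hp'

theorem getD_grams (t : List Char) (ps : List (List Char)) (p : List Char) (hp : p ∈ ps) :
    PySem.Dict.getD (ps.foldl (cwStep t) PySem.Dict.empty) p.length ([] : PySem.Set (List Char))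
      = cwGrams t p.length := by
  rcases hS : PySem.Dict.get? (ps.foldl (cwStep t) PySem.Dict.empty) p.length with _ | S
  · have := isSome_foldl_cwStep t ps PySem.Dict.empty p hp
    rw [hS] at this; cases this
  · have hval : S = cwGrams t p.length := by
      refine get?_foldl_cwStep t ps PySem.Dict.empty ?_ p.length S hS
      intro L S' h'
      rw [PySem.Dict.get?_empty] at h'; cases h'
    rw [PySem.Dict.getD_eq_get?_getD, hS, hval]; rfl

-- {k for k, p in zip(ks, [f(k) for k in ks]) if c(p)} over-lists is a filter of ks
theorem map_fst_filter_zip (ks : List String) (f : String → List Char)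
    (c : String × List Char → Bool) :
    (((ks.zip (ks.map f)).filter c).map Prod.fst) = ks.filter (fun k => c (k, f k)) := by
  induction ks with
  | nil => rfl
  | cons k ks ih =>
    simp only [List.map_cons, List.zip_cons_cons, List.filter_cons]
    cases c (k, f k) <;> simp [ih]

theorem isIn_eq_contains_cwGrams (p t : List Char) :
    PySem.Chars.isIn p t = PySem.Set.contains (cwGrams t p.length) p :=
  Bool.eq_iff_iff.mpr ((charsIsIn_iff p t).trans (contains_cwGrams p t).symm)

-- ===== VERDICT (by name: the statement is the Claim_ definition above) =====
theorem contains_keywords_spec : Claim_equal_contains_keywords := by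
  intro text keywords case_sensitive _
  unfold Spec_contains_keywords contains_keywords contains_keywords_alt
  by_cases ht : text = ""
  · simp [ht]
  · rcases case_sensitive with _ | _ <;>
    · simp only [ht, Bool.not_true, Bool.not_false, Bool.false_eq_true, Bool.true_eq_false,
        if_true, if_false, PySem.Set.ofList_eq_foldl, PySem.Str.isIn_eq,
        PySem.Str.toList_lower, PySem.Set.empty]
      rw [map_fst_filter_zip, List.foldl_filter]
      refine PySem.List.foldl_congr_mem _ _ _ _ ?_
      intro acc k hk
      dsimp only
      rw [getD_grams _ _ _ (List.mem_map_of_mem hk)]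
      simp only [isIn_eq_contains_cwGrams]
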